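-- pv_equiv track=rewrite | github.com/akshat98/unittesting | src/playing_board.py | get_playing_board
-- ===== SOURCE A (Python) =====
-- def get_playing_board(n: int)-> list[str]:
--     def get_char(ind : int)-> str:
--         return '*' if ind%2 == 0 else ' '
--
--     toggle = False
--     matrix = []
--     for j in range(n):
--         row = ""
--         for i in range(n):
--             row+= "*" if toggle else " "
--             toggle = not toggle
--         toggle = not toggle if(n%2==0) else toggle
--         matrix.append(row)
--     return matrix
-- ===== SOURCE B (Python) =====
-- def get_playing_board(n: int) -> list[str]:
--     return [''.join('*' if (i + j) % 2 else ' ' for i in range(n))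
--             for j in range(n)]
-- ===== Notes on version B (the rewrite author's own statement) =====
-- stated objective: simpler
-- what changed: Each cell is computed directly from index parity (i+j)%2 via a comprehension, removing the mutable toggle state threaded across rows and the n%2 end-of-row correction (and the unused get_char helper).
import Mathlib
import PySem

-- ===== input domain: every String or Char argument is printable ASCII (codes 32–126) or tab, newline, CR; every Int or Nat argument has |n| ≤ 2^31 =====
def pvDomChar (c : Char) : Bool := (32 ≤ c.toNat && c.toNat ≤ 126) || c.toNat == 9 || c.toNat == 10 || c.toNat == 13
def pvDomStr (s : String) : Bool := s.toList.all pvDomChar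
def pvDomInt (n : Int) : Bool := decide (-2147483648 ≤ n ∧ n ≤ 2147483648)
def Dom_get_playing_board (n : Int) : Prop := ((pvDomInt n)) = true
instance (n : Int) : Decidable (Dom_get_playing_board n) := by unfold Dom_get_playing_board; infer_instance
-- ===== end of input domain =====

-- B computes each cell directly from index parity (i+j)%2, dropping A's running
-- toggle state and its n%2 end-of-row correction (objective: simpler).

-- ===== PORT A =====
-- A's loop body over j: inner loop appends one char per i and flips toggle;
-- after the row, toggle is flipped again iff n % 2 == 0; the row is appended.
def pvStepA (n : Int) (st : Bool × List String) (_j : Int) : Bool × List String :=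
  let inner := (PySem.List.pyRange 0 n 1).foldl
    (fun (p : Bool × List Char) _i =>
      (!p.1, p.2 ++ (if p.1 then ['*'] else [' '])))
    (st.1, [])
  let toggle := if PySem.Int.mod n 2 = 0 then !inner.1 else inner.1
  (toggle, st.2 ++ [String.mk inner.2])

def get_playing_board (n : Int) : List String :=
  ((PySem.List.pyRange 0 n 1).foldl (pvStepA n) (false, [])).2

-- ===== PORT B =====
def get_playing_board_alt (n : Int) : List String :=
  (PySem.List.pyRange 0 n 1).map (fun j =>
    String.mk ((PySem.List.pyRange 0 n 1).map (fun i =>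
      if PySem.Int.mod (i + j) 2 ≠ 0 then '*' else ' ')))

-- ===== PRECONDITION & SPEC =====
def Spec_get_playing_board (n : Int) (out : List String) : Prop := out = get_playing_board_alt n
instance (n : Int) (out : List String) : Decidable (Spec_get_playing_board n out) := by unfold Spec_get_playing_board; infer_instance

-- ===== CLAIM (what is proved, stated in full; the proofs are below) =====
def Claim_equal_get_playing_board : Prop := ∀ (n : Int), Dom_get_playing_board n → Spec_get_playing_board n (get_playing_board n)

-- ===== LEMMAS AND PROOFS =====

-- the cell A's toggle machine produces at column k of a row whose toggle starts at t
def pvCell (t : Bool) (k : Nat) : Char :=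
  if xor (decide (k % 2 = 1)) t then '*' else ' '

theorem pvCell_succ (t : Bool) (k : Nat) : pvCell t (k + 1) = pvCell (!t) k := by
  unfold pvCell
  have h : ((k + 1) % 2 = 1) ↔ ¬ (k % 2 = 1) := by omega
  rcases Nat.mod_two_eq_zero_or_one k with h2 | h2 <;> simp [h2, h] <;> cases t <;> rfl

-- inner loop: the fold ignores the elements; it flips the toggle once per element
-- and emits pvCell t k at position k
theorem pvInner (L : List Int) (t : Bool) (acc : List Char) :
    L.foldl (fun (p : Bool × List Char) _i =>
        (!p.1, p.2 ++ (if p.1 then ['*'] else [' ']))) (t, acc)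
      = (xor (decide (L.length % 2 = 1)) t,
         acc ++ (List.range L.length).map (pvCell t)) := by
  induction L generalizing t acc with
  | nil => simp
  | cons x L ih =>
      simp only [List.foldl_cons, ih (!t), Prod.mk.injEq]
      constructor
      · have h : ((L.length + 1) % 2 = 1) ↔ ¬ (L.length % 2 = 1) := by omega
        rcases Nat.mod_two_eq_zero_or_one L.length with h2 | h2 <;>
          simp [List.length_cons, h2, h] <;> cases t <;> rfl
      · rw [List.length_cons, List.range_succ_eq_map]
        simp only [List.map_cons, List.map_map]
        have h0 : pvCell t 0 = (if t then '*' else ' ') := by cases t <;> rfl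
        have h1 : (List.range L.length).map (pvCell t ∘ (· + 1))
            = (List.range L.length).map (pvCell (!t)) := by
          apply List.map_congr_left; intro k _; exact pvCell_succ t k
        cases t <;> simp [h0, h1]

-- the row-start toggle always flips between rows: xoring by the row-length parity
-- and then flipping iff n % 2 == 0 gives !t whenever the row length is n.toNat
theorem pvFlip (n : Int) (hn : 0 ≤ n) (t : Bool) :
    (if PySem.Int.mod n 2 = 0 then !(xor (decide (n.toNat % 2 = 1)) t)
     else xor (decide (n.toNat % 2 = 1)) t) = !t := by
  obtain ⟨m, rfl⟩ := Int.eq_ofNat_of_zero_le hn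
  have h : PySem.Int.mod (m : Int) 2 = ((m % 2 : Nat) : Int) := by
    exact_mod_cast PySem.Int.mod_natCast m 2
  rcases Nat.mod_two_eq_zero_or_one m with h2 | h2 <;>
    rw [h, h2] <;> simp [h2] <;> cases t <;> rfl

-- outer loop: row r (0-based within L) starts with toggle (xor (r odd) t)
theorem pvOuter (n : Int) (hn : 0 ≤ n) (L : List Int) (t : Bool) (acc : List String) :
    (L.foldl (pvStepA n) (t, acc)).2
      = acc ++ (List.range L.length).map
          (fun r => String.mk ((List.range n.toNat).map (pvCell (xor (decide (r % 2 = 1)) t)))) := by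
  induction L generalizing t acc with
  | nil => simp
  | cons x L ih =>
      have hlen : (PySem.List.pyRange 0 n 1).length = n.toNat := by
        simpa using PySem.List.length_pyRange_one 0 n
      rw [List.foldl_cons]
      have hstep : pvStepA n (t, acc) x
          = (!t, acc ++ [String.mk ((List.range n.toNat).map (pvCell t))]) := by
        simp only [pvStepA, pvInner, hlen, pvFlip n hn, List.nil_append]
      rw [hstep, ih (!t)]
      rw [List.length_cons, List.range_succ_eq_map]
      simp only [List.map_cons, List.map_map, List.append_assoc, List.singleton_append]
      have h0 : (decide ((0:Nat) % 2 = 1)).xor t = t := by cases t <;> rfl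
      have hf : ((fun r => String.mk (List.map (pvCell ((decide (r % 2 = 1)).xor t)) (List.range n.toNat))) ∘ Nat.succ)
          = fun r => String.mk (List.map (pvCell ((decide (r % 2 = 1)).xor (!t))) (List.range n.toNat)) := by
        funext r
        simp only [Function.comp_def]
        congr 2
        have h3 : (Nat.succ r % 2 = 1) ↔ ¬ (r % 2 = 1) := by omega
        rcases Nat.mod_two_eq_zero_or_one r with h | h <;>
          simp [h, h3] <;> cases t <;> rfl
      rw [hf, h0]

-- B's cell equals pvCell of the row parity, for nonnegative indices
theorem pvCellB (j k : Nat) :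
    (if PySem.Int.mod ((k : Int) + (j : Int)) 2 ≠ 0 then '*' else ' ')
      = pvCell (decide (j % 2 = 1)) k := by
  have h : ((k : Int) + (j : Int)) = ((k + j : Nat) : Int) := by push_cast; ring
  have h2 : (2 : Int) = ((2 : Nat) : Int) := rfl
  rw [h, h2, PySem.Int.mod_natCast]
  unfold pvCell
  rcases Nat.mod_two_eq_zero_or_one k with hk | hk <;>
    rcases Nat.mod_two_eq_zero_or_one j with hj | hj <;>
      simp [Nat.add_mod, hk, hj]

theorem pv_main (n : Int) : get_playing_board n = get_playing_board_alt n := by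
  rcases le_or_gt 0 n with hn | hn
  · unfold get_playing_board get_playing_board_alt
    rw [pvOuter n hn, PySem.List.pyRange_zero n]
    simp only [List.map_map, List.length_map, List.length_range, List.nil_append]
    apply List.map_congr_left
    intro r _
    simp only [Function.comp_def, Bool.xor_false]
    congr 1
    apply List.map_congr_left
    intro k _
    exact (pvCellB r k).symm
  · have h : PySem.List.pyRange 0 n 1 = [] :=
      PySem.List.pyRange_one_eq_nil (by omega)
    unfold get_playing_board get_playing_board_alt
    rw [h]; rfl

-- ===== VERDICT (by name: the statement is the Claim_ definition above) =====
theorem get_playing_board_spec : Claim_equal_get_playing_board := by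
  intro n _
  unfold Spec_get_playing_board
  exact pv_main n
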